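-- pv_equiv track=rewrite | github.com/warrenregister/GEMSEC_DNA_Seq | entropy_plotter.py | name_wash_combs
-- ===== SOURCE A (Python) =====
-- def name_wash_combs(wash_combs):
--     '''
--     Returns a list of representative names for a list of the different
--     filtered combinations of washes for a set's washes.
--
--     wash_combs: list of filtered combinations of a set's washes
--     '''
--     curname = 'w'
--     names = []
--     for washnum, wash in enumerate(wash_combs):
--         if washnum < len(wash_combs) - 1:
--             curname += str(washnum)
--         else:
--             curname += 'e'
--         names.append(curname)
--
--     return names
-- ===== SOURCE B (Python) =====
-- def name_wash_combs(wash_combs):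
--     '''
--     Returns a list of representative names for a list of the different
--     filtered combinations of washes for a set's washes.
--
--     wash_combs: list of filtered combinations of a set's washes
--     '''
--     n = len(wash_combs)
--
--     def pref(k):
--         return 'w' + ''.join(str(j) for j in range(k))
--
--     return [pref(i + 1) if i < n - 1 else pref(n - 1) + 'e' for i in range(n)]
-- ===== Notes on version B (the rewrite author's own statement) =====
-- stated objective: alternative
-- what changed: Each name is computed independently from its index by a direct formula (join of str(j) over a range), replacing A's accumulator string threaded across loop iterations.
import Mathlib
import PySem

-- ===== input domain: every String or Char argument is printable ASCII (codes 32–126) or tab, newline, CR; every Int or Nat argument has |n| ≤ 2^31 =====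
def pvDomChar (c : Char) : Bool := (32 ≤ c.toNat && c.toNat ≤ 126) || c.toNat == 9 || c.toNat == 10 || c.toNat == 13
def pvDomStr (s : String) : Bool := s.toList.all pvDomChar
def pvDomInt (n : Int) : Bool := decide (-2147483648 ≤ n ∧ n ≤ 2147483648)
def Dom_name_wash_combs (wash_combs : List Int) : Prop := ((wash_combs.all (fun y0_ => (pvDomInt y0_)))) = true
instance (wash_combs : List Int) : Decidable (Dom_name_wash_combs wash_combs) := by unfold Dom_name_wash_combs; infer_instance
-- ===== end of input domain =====

-- B names each combination by a direct per-index formula instead of A's accumulator string threaded through the loop (alternative decomposition, same results).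


-- ===== PORT A =====
-- the for-loop over enumerate(wash_combs) with running state (curname, names)
def nameLoop (total : Nat) : List Int → Nat → String → List String → List String
  | [], _, _, names => names
  | _ :: rest, washnum, curname, names =>
    let curname' := if washnum < total - 1 then curname ++ PySem.Int.toStr (washnum : Int)
                    else curname ++ "e"
    nameLoop total rest (washnum + 1) curname' (names ++ [curname'])

def name_wash_combs (wash_combs : List Int) : List String :=
  nameLoop wash_combs.length wash_combs 0 "w" []

-- ===== PORT B =====
-- pref(k) = 'w' + ''.join(str(j) for j in range(k))
def prefName (k : Nat) : String :=
  "w" ++ PySem.Str.join "" ((List.range k).map (fun j => PySem.Int.toStr (j : Int)))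

def name_wash_combs_alt (wash_combs : List Int) : List String :=
  let n := wash_combs.length
  (List.range n).map (fun i => if i < n - 1 then prefName (i + 1) else prefName (n - 1) ++ "e")

-- ===== PRECONDITION & SPEC =====
def Spec_name_wash_combs (wash_combs : List Int) (out : List String) : Prop := out = name_wash_combs_alt wash_combs
instance (wash_combs : List Int) (out : List String) : Decidable (Spec_name_wash_combs wash_combs out) := by unfold Spec_name_wash_combs; infer_instance

-- ===== CLAIM (what is proved, stated in full; the proofs are below) =====
def Claim_equal_name_wash_combs : Prop := ∀ (wash_combs : List Int), Dom_name_wash_combs wash_combs → Spec_name_wash_combs wash_combs (name_wash_combs wash_combs)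

-- ===== LEMMAS AND PROOFS =====
theorem flatten_intersperse_nil : ∀ (l : List (List Char)),
    (List.intersperse ([] : List Char) l).flatten = l.flatten
  | [] => rfl
  | [_] => by simp
  | x :: y :: t => by
    have ih := flatten_intersperse_nil (y :: t)
    rw [show List.intersperse ([] : List Char) (x :: y :: t)
          = x :: [] :: List.intersperse [] (y :: t) from rfl]
    simp [ih]

theorem join_empty_snoc (l : List String) (s : String) :
    PySem.Str.join "" (l ++ [s]) = PySem.Str.join "" l ++ s := by
  simp only [PySem.Str.join, PySem.Chars.join, List.intercalate, List.map_append, List.map_cons,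
    List.map_nil]
  rw [show ("" : String).toList = ([] : List Char) from rfl, flatten_intersperse_nil,
    flatten_intersperse_nil, List.flatten_append, List.flatten_cons, List.flatten_nil,
    List.append_nil, String.ofList_append, String.ofList_toList]

theorem prefName_succ (i : Nat) :
    prefName i ++ PySem.Int.toStr (i : Int) = prefName (i + 1) := by
  simp [prefName, List.range_succ, join_empty_snoc, String.append_assoc]

theorem nameLoop_eq (total : Nat) : ∀ (rest : List Int) (i : Nat) (acc : List String),
    i + rest.length = total →
    nameLoop total rest i (prefName i) acc =
      acc ++ (List.range' i rest.length).map
        (fun idx => if idx < total - 1 then prefName (idx + 1) else prefName (total - 1) ++ "e")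
  | [], _, acc, _ => by simp [nameLoop]
  | _ :: rest, i, acc, h => by
    simp only [List.length_cons] at h
    by_cases hc : i < total - 1
    · have hrec := nameLoop_eq total rest (i + 1) (acc ++ [prefName (i + 1)]) (by omega)
      simp [nameLoop, hc, prefName_succ, hrec, List.range'_succ]
    · have hlen : rest.length = 0 := by omega
      have hi : i = total - 1 := by omega
      cases List.eq_nil_of_length_eq_zero hlen
      simp [nameLoop, List.range'_succ, hi]

-- ===== VERDICT (by name: the statement is the Claim_ definition above) =====
theorem name_wash_combs_spec : Claim_equal_name_wash_combs := by
  intro xs _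
  show name_wash_combs xs = name_wash_combs_alt xs
  have h0 : prefName 0 = "w" := by rfl
  have := nameLoop_eq xs.length xs 0 [] (by simp)
  rw [h0] at this
  simp [name_wash_combs, name_wash_combs_alt, this, List.range_eq_range']
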